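-- pv_equiv track=rewrite | github.com/tcosmo/cdgp | cdgp/quadarithmetic.py | occ
-- ===== SOURCE A (Python) =====
-- from typing import List, Callable, Tuple
--
-- def list_of_circular_shifts(word : str) -> List[str]:
--
--     """
--     Returns the list of circular shifts of a string :
--     :code:`list_of_circular_shifts('RLR')`.
--
--     Args:
--         `word` (str): a word (supposedly binary L&R)
--
--     Returns:
--         list of str: list of circular shifts
--
--     :Example:
--         >>> list_of_circular_shifts('RLR')
--         ['RLR', 'LRR', 'RRL']
--         >>> list_of_circular_shifts('LL')
--         ['LL']
--     """
--
--     n = len(word)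
--     return ["".join([word[i - j] for i in range(n)]) for j in range(n)]
--
-- def occ(P,A):
--     # Returns the number of times P appears at the begining of circular shifts of A.
--     shifts = list_of_circular_shifts(A)
--     counter = 0
--     n,l = len(P), len(A)
--
--     for shift in shifts:
--         power = shift + shift * (n//l)
--         if power[:n] == P:
--             counter += 1
--
--     return counter
-- ===== SOURCE B (Python) =====
-- def occ(P, A):
--     # Count circular shifts of A that start with P by searching P once in a
--     # cyclic text of A, instead of building every shift and its power.
--     n, l = len(P), len(A)
--     if l == 0:
--         return 0
--     if n == 0:
--         return l
--     reps = -((-(l + n - 1)) // l)          # ceil((l+n-1)/l)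
--     T = (A * reps)[: l + n - 1]            # cyclic A, long enough for all starts < l
--     count = 0
--     pos = T.find(P)
--     while pos != -1:
--         count += 1
--         pos = T.find(P, pos + 1)
--     return count
-- ===== Notes on version B (the rewrite author's own statement) =====
-- stated objective: faster
-- what changed: Instead of materializing every circular shift of A plus its repeated 'power' string and comparing each against P, B builds one cyclic text T = first len(A)+len(P)-1 chars of A repeated and counts the occurrences of P in T with repeated str.find.
import Mathlib
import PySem

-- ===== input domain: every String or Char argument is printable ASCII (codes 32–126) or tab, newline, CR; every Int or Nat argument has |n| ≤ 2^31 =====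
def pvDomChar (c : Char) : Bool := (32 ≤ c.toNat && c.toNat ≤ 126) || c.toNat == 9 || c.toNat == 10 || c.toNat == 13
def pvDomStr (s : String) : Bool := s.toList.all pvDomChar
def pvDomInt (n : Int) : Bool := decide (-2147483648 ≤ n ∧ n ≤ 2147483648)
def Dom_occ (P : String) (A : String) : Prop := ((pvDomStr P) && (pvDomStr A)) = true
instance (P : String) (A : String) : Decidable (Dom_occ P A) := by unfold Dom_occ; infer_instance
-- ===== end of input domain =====

-- B replaces "build every circular shift and its power" by one substring search of P
-- in a bounded cyclic text of A (objective: faster).  Both programs are pure.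

-- ===== PORT A =====
-- list_of_circular_shifts(word): ["".join([word[i - j] for i in range(n)]) for j in range(n)]
-- (word[i - j] uses Python negative indexing; it is always in range here, so pyGetD is exact)
def circularShifts (word : List Char) : List (List Char) :=
  (PySem.List.pyRange 0 (word.length : Int) 1).map (fun j =>
    (PySem.List.pyRange 0 (word.length : Int) 1).map (fun i =>
      PySem.List.pyGetD word (i - j) ' '))

-- occ(P, A): for shift in shifts: power = shift + shift * (n//l); if power[:n] == P: counter += 1
-- (n//l is only evaluated inside the loop body, which is never entered when l = 0 — as in Python)
def occ (P : String) (A : String) : Int :=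
  let shifts := circularShifts A.toList
  let n : Int := (P.toList.length : Int)
  let l : Int := (A.toList.length : Int)
  shifts.foldl (fun counter shift =>
    let power := shift ++ PySem.List.pyRepeat shift (PySem.Int.floordiv n l)
    if PySem.List.slice power none (some n) = P.toList then counter + 1 else counter) 0

-- ===== PORT B =====
-- termination fact for the find loop: a start past the end finds nothing
theorem pvFindFromGt (t p : List Char) (s : Nat) (h : t.length < s) :
    PySem.Chars.findFrom t p (s : Int) none = -1 := by
  simp only [PySem.Chars.findFrom]
  have h1 : ((t.length : Int)) < (s : Int) := by exact_mod_cast h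
  have h2 : ¬ ((s : Int) < 0) := by omega
  simp only [if_neg h2, if_pos h1]

-- while pos != -1: count += 1; pos = T.find(P, pos + 1)   (entered with pos = T.find(P), i.e. findFrom … 0)
def occFindLoop (t p : List Char) (s : Nat) (count : Int) : Int :=
  let pos := PySem.Chars.findFrom t p (s : Int) none
  if pos = -1 then count
  else occFindLoop t p (pos.toNat + 1) (count + 1)
termination_by t.length + 1 - s
decreasing_by
  rename_i hne
  by_cases hs : s ≤ t.length
  · have hspec := PySem.Chars.findFrom_natCast_spec t p s hs hne
    omega
  · exact absurd (pvFindFromGt t p s (by omega)) hne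

def occ_alt (P : String) (A : String) : Int :=
  let p := P.toList
  let a := A.toList
  let n : Int := (p.length : Int)
  let l : Int := (a.length : Int)
  if l = 0 then 0
  else if n = 0 then l
  else
    let reps := -(PySem.Int.floordiv (-(l + n - 1)) l)
    let t := PySem.List.slice (PySem.List.pyRepeat a reps) none (some (l + n - 1))
    occFindLoop t p 0 0

-- ===== PRECONDITION & SPEC =====
def Spec_occ (P : String) (A : String) (out : Int) : Prop := out = occ_alt P A
instance (P : String) (A : String) (out : Int) : Decidable (Spec_occ P A out) := by unfold Spec_occ; infer_instance

-- ===== CLAIM (what is proved, stated in full; the proofs are below) =====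
def Claim_equal_occ : Prop := ∀ (P : String) (A : String), Dom_occ P A → Spec_occ P A (occ P A)

-- ===== LEMMAS AND PROOFS =====
-- P read at offset q of the cyclic string A (Bool so that Finset.filter needs no extra instance)
def cyclicMatch (p a : List Char) (q : Nat) : Bool :=
  decide (∀ i < p.length, p[i]? = a[(q + i) % a.length]?)

def matchCnt (t p : List Char) (s : Nat) : Nat :=
  ((Finset.range t.length).filter (fun j => s ≤ j ∧ p <+: t.drop j)).card

theorem prefix_drop_infix (t p : List Char) (s j : Nat) (hsj : s ≤ j)
    (h : p <+: t.drop j) : p <:+: t.drop s := by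
  have : t.drop j = (t.drop s).drop (j - s) := by rw [List.drop_drop]; congr 1; omega
  rw [this] at h
  exact List.infix_iff_prefix_suffix.mpr ⟨_, h, List.drop_suffix _ _⟩

theorem occFindLoop_eq (t p : List Char) (hp : p ≠ []) (s : Nat) (count : Int) :
    occFindLoop t p s count = count + matchCnt t p s := by
  fun_induction occFindLoop t p s count with
  | case1 a b c d =>
    have hz : matchCnt t p a = 0 := by
      unfold matchCnt
      rw [Finset.card_eq_zero, Finset.filter_eq_empty_iff]
      intro j hj
      rintro ⟨haj, hpref⟩
      by_cases ha : a ≤ t.length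
      · exact ((PySem.Chars.findFrom_natCast_eq_neg_one_iff t p a ha).mp d)
          (prefix_drop_infix t p a j haj hpref)
      · rw [Finset.mem_range] at hj; omega
    rw [hz]; simp
  | case2 a b c d e =>
    have hs : a ≤ t.length := by
      by_contra hgt
      exact d (pvFindFromGt t p a (by omega))
    obtain ⟨h1, h2, h3⟩ := PySem.Chars.findFrom_natCast_spec t p a hs d
    have hclen : c.toNat < t.length := by
      have hle := h2.length_le
      rw [List.length_drop] at hle
      have hplen : 0 < p.length := List.length_pos_iff.mpr hp
      omega
    have hstep : matchCnt t p a = matchCnt t p (c.toNat + 1) + 1 := by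
      unfold matchCnt
      have hset : (Finset.range t.length).filter (fun j => a ≤ j ∧ p <+: t.drop j)
          = insert c.toNat ((Finset.range t.length).filter (fun j => c.toNat + 1 ≤ j ∧ p <+: t.drop j)) := by
        ext j
        simp only [Finset.mem_filter, Finset.mem_insert, Finset.mem_range]
        constructor
        · rintro ⟨hj, haj, hpref⟩
          rcases Nat.lt_trichotomy j c.toNat with hlt | heq | hgt
          · exact absurd hpref (h3 j haj hlt)
          · exact Or.inl heq
          · exact Or.inr ⟨hj, by omega, hpref⟩
        · rintro (rfl | ⟨hj, hcj, hpref⟩)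
          · exact ⟨hclen, by omega, h2⟩
          · exact ⟨hj, by omega, hpref⟩
      rw [hset, Finset.card_insert_of_notMem (by simp)]
    rw [e, hstep]
    push_cast
    ring

theorem getElem?_flatten_replicate {α : Type} (xs : List α) (k i : Nat)
    (h : i < k * xs.length) :
    ((List.replicate k xs).flatten)[i]? = xs[i % xs.length]? := by
  induction k generalizing i with
  | zero => omega
  | succ k ih =>
    have hmul : (k + 1) * xs.length = k * xs.length + xs.length := by ring
    rw [List.replicate_succ, List.flatten_cons]
    by_cases hi : i < xs.length
    · rw [List.getElem?_append_left hi, Nat.mod_eq_of_lt hi]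
    · have hx : 0 < xs.length := by
        rcases Nat.eq_zero_or_pos xs.length with h0 | h0
        · rw [h0, Nat.mul_zero] at h; omega
        · exact h0
      rw [List.getElem?_append_right (by omega)]
      conv_rhs => rw [Nat.mod_eq_sub_mod (by omega)]
      exact ih (i - xs.length) (by omega)

theorem cardFilterRange (n : Nat) (p : Nat → Prop) [DecidablePred p] :
    ((Finset.range n).filter p).card = (List.range n).countP (fun j => decide (p j)) := by
  induction n with
  | zero => simp
  | succ n ih =>
    rw [Finset.range_add_one, List.range_succ, List.countP_append, Finset.filter_insert]
    by_cases hp : p n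
    · rw [if_pos hp, Finset.card_insert_of_notMem (by simp), ih]
      simp [hp]
    · rw [if_neg hp, ih]
      simp [hp]

theorem cycIdx (l j i : Nat) (hl : 0 < l) (hj : j < l) :
    ((l - j) % l + i) % l = if j ≤ i % l then i % l - j else l - (j - i % l) := by
  have hr : i % l < l := Nat.mod_lt _ hl
  have e1 : ((l - j) % l + i) % l = ((l - j) % l % l + i % l) % l := by
    rw [Nat.add_mod]
  have e2 : (l - j) % l % l = (l - j) % l := Nat.mod_mod_of_dvd _ dvd_rfl
  have e3 : (l - j) % l = if j = 0 then 0 else l - j := by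
    split_ifs with h0
    · subst h0; simp [Nat.mod_self]
    · exact Nat.mod_eq_of_lt (by omega)
  rw [e1, e2, e3]
  split_ifs with h0 hle hle
  · subst h0; simp [Nat.mod_eq_of_lt hr]
  · subst h0; omega
  · -- j ≠ 0, j ≤ i % l : (l - j + i%l) % l = i%l - j ; l ≤ l - j + i%l < 2l
    rw [Nat.mod_eq_sub_mod (by omega), Nat.mod_eq_of_lt (by omega)]
    omega
  · rw [Nat.mod_eq_of_lt (by omega)]
    omega

theorem shiftGet (a : List Char) (j i : Nat) (hj : j < a.length) (hi : i < a.length) :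
    ((PySem.List.pyRange 0 (a.length : Int) 1).map
        (fun k => PySem.List.pyGetD a (k - (j : Int)) ' '))[i]? =
      a[((a.length - j) % a.length + i) % a.length]? := by
  have hl : 0 < a.length := by omega
  rw [PySem.List.pyRange_zero_nat, List.map_map, List.getElem?_map,
    List.getElem?_eq_getElem (by simpa using hi), List.getElem_range]
  simp only [Option.map_some, Function.comp_apply]
  rw [cycIdx a.length j i hl hj, Nat.mod_eq_of_lt hi]
  by_cases hji : j ≤ i
  · have hc : (i : Int) - (j : Int) = ((i - j : Nat) : Int) := by omega
    rw [hc, if_pos hji, PySem.List.pyGetD_natCast,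
      List.getD_eq_getElem?_getD, List.getElem?_eq_getElem (by omega)]
    rfl
  · have hc : (i : Int) - (j : Int) = -(((j - i : Nat) : Int)) := by omega
    rw [hc, if_neg hji, PySem.List.pyGetD_neg_natCast a (j - i) ' ' (by omega) (by omega),
      List.getElem?_eq_getElem (by omega)]

theorem take_eq_iff_getElem? {α : Type} (xs p : List α) :
    xs.take p.length = p ↔ ∀ i < p.length, xs[i]? = p[i]? := by
  constructor
  · intro h i hi
    have h2 := congrArg (fun ys => ys[i]?) h
    simp only at h2
    rw [List.getElem?_take_of_lt hi] at h2
    exact h2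
  · intro h
    apply List.ext_getElem?
    intro i
    by_cases hi : i < p.length
    · rw [List.getElem?_take_of_lt hi]; exact h i hi
    · rw [List.getElem?_eq_none (by simp; omega), List.getElem?_eq_none (by omega)]


theorem condA_iff (p a : List Char) (j : Nat) (hj : j < a.length) (hn : p ≠ []) :
    (PySem.List.slice
        ((PySem.List.pyRange 0 (a.length : Int) 1).map (fun i => PySem.List.pyGetD a (i - (j : Int)) ' ')
          ++ PySem.List.pyRepeat
              ((PySem.List.pyRange 0 (a.length : Int) 1).map (fun i => PySem.List.pyGetD a (i - (j : Int)) ' '))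
              (PySem.Int.floordiv (p.length : Int) (a.length : Int)))
        none (some (p.length : Int)) = p)
    ↔ cyclicMatch p a ((a.length - j) % a.length) = true := by
  have hl : 0 < a.length := by omega
  have hn' : 0 < p.length := List.length_pos_iff.mpr hn
  set S := (PySem.List.pyRange 0 (a.length : Int) 1).map
      (fun i => PySem.List.pyGetD a (i - (j : Int)) ' ') with hS
  have hSlen : S.length = a.length := by
    rw [hS, List.length_map, PySem.List.pyRange_zero_nat, List.length_map, List.length_range]
  have hfd : PySem.Int.floordiv ((p.length : Nat) : Int) ((a.length : Nat) : Int)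
      = ((p.length / a.length : Nat) : Int) := PySem.Int.floordiv_natCast _ _
  have hrep : PySem.List.pyRepeat S ((p.length / a.length : Nat) : Int)
      = (List.replicate (p.length / a.length) S).flatten := by
    simp only [PySem.List.pyRepeat, Int.toNat_natCast]
  have hpow : S ++ (List.replicate (p.length / a.length) S).flatten
      = (List.replicate (p.length / a.length + 1) S).flatten := by
    rw [List.replicate_succ, List.flatten_cons]
  have hflen : ((List.replicate (p.length / a.length + 1) S).flatten).length
      = (p.length / a.length + 1) * a.length := by simp [hSlen]
  have hmul : (p.length / a.length + 1) * a.length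
      = a.length * (p.length / a.length) + a.length := by ring
  have hdm := Nat.div_add_mod p.length a.length
  have hmod := Nat.mod_lt p.length hl
  have hnle : p.length ≤ (p.length / a.length + 1) * a.length := by omega
  rw [hfd, hrep, hpow, PySem.List.slice_to_natCast,
    take_eq_iff_getElem? _ _]
  unfold cyclicMatch
  rw [decide_eq_true_eq]
  apply forall_congr'
  intro i
  apply imp_congr_right
  intro hi
  rw [getElem?_flatten_replicate S _ i (by rw [hSlen]; omega), hSlen]
  rw [shiftGet a j (i % a.length) hj (Nat.mod_lt _ hl)]
  rw [Nat.add_mod_mod, eq_comm]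

-- the cyclic text used by B: first l+n-1 characters of A repeated ceil((l+n-1)/l) times
theorem cyclicText_spec (p a : List Char) (hl : a ≠ []) (hn : p ≠ []) :
    (PySem.List.slice
        (PySem.List.pyRepeat a
          (-(PySem.Int.floordiv (-((a.length : Int) + (p.length : Int) - 1)) (a.length : Int))))
        none (some ((a.length : Int) + (p.length : Int) - 1))).length
      = a.length + p.length - 1 ∧
    ∀ i < a.length + p.length - 1,
      (PySem.List.slice
        (PySem.List.pyRepeat a
          (-(PySem.Int.floordiv (-((a.length : Int) + (p.length : Int) - 1)) (a.length : Int))))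
        none (some ((a.length : Int) + (p.length : Int) - 1)))[i]? = a[i % a.length]? := by
  have hl' : 0 < a.length := List.length_pos_iff.mpr hl
  have hn' : 0 < p.length := List.length_pos_iff.mpr hn
  set L : Nat := a.length + p.length - 1 with hL
  have hcast : (a.length : Int) + (p.length : Int) - 1 = ((L : Nat) : Int) := by omega
  set R : Int := -(PySem.Int.floordiv (-((a.length : Int) + (p.length : Int) - 1)) (a.length : Int)) with hR
  obtain ⟨hb1, hb2⟩ := (PySem.Int.neg_floordiv_neg_eq_iff_of_pos
      (a := (a.length : Int) + (p.length : Int) - 1) (b := (a.length : Int)) (q := R)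
      (by exact_mod_cast hl')).mp rfl
  have hR1 : 1 ≤ R := by nlinarith [hb2]
  have hRlen : (PySem.List.pyRepeat a R).length = R.toNat * a.length := by
    simp [PySem.List.pyRepeat]
  have hLle : L ≤ R.toNat * a.length := by
    have : (L : Int) ≤ R * (a.length : Int) := by omega
    have hcast2 : (R.toNat : Int) = R := Int.toNat_of_nonneg (by omega)
    have : (L : Int) ≤ (R.toNat : Int) * (a.length : Int) := by rw [hcast2]; omega
    exact_mod_cast this
  rw [hcast, PySem.List.slice_to_natCast]
  constructor
  · rw [List.length_take, hRlen]; omega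
  · intro i hi
    rw [List.getElem?_take_of_lt (by omega)]
    unfold PySem.List.pyRepeat
    rw [getElem?_flatten_replicate a R.toNat i (by omega)]

theorem prefix_iff_cyclicMatch (p a : List Char) (hl : a ≠ []) (hn : p ≠ []) (q : Nat)
    (hq : q < a.length) :
    (p <+: (PySem.List.slice
        (PySem.List.pyRepeat a
          (-(PySem.Int.floordiv (-((a.length : Int) + (p.length : Int) - 1)) (a.length : Int))))
        none (some ((a.length : Int) + (p.length : Int) - 1))).drop q)
    ↔ cyclicMatch p a q = true := by
  have hn' : 0 < p.length := List.length_pos_iff.mpr hn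
  obtain ⟨hTlen, hTget⟩ := cyclicText_spec p a hl hn
  rw [List.prefix_iff_eq_take, eq_comm, take_eq_iff_getElem?]
  unfold cyclicMatch
  rw [decide_eq_true_eq]
  apply forall_congr'
  intro i
  apply imp_congr_right
  intro hi
  rw [List.getElem?_drop, hTget (q + i) (by omega), eq_comm]

theorem noMatchBeyond (p a : List Char) (hl : a ≠ []) (hn : p ≠ []) (q : Nat)
    (hq : a.length ≤ q) :
    ¬ (p <+: (PySem.List.slice
        (PySem.List.pyRepeat a
          (-(PySem.Int.floordiv (-((a.length : Int) + (p.length : Int) - 1)) (a.length : Int))))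
        none (some ((a.length : Int) + (p.length : Int) - 1))).drop q) := by
  have hn' : 0 < p.length := List.length_pos_iff.mpr hn
  have hl' : 0 < a.length := List.length_pos_iff.mpr hl
  obtain ⟨hTlen, _⟩ := cyclicText_spec p a hl hn
  intro h
  have hle := h.length_le
  rw [List.length_drop, hTlen] at hle
  omega

theorem shift_invol (l : Nat) : ∀ j, j < l → (l - ((l - j) % l)) % l = j := by
  intro j hj
  rcases Nat.eq_zero_or_pos j with rfl | hj0
  · simp [Nat.mod_self]
  · have h1 : (l - j) % l = l - j := Nat.mod_eq_of_lt (by omega)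
    rw [h1, Nat.mod_eq_of_lt (by omega)]
    omega

theorem card_shift_bij (l : Nat) (Q : Nat → Prop) [DecidablePred Q] :
    ((Finset.range l).filter (fun j => Q ((l - j) % l))).card
      = ((Finset.range l).filter Q).card := by
  rcases Nat.eq_zero_or_pos l with rfl | hl
  · simp
  apply Finset.card_bij (fun j _ => (l - j) % l)
  · intro j hj
    rw [Finset.mem_filter, Finset.mem_range] at hj ⊢
    exact ⟨Nat.mod_lt _ hl, hj.2⟩
  · intro j1 hj1 j2 hj2 heq
    rw [Finset.mem_filter, Finset.mem_range] at hj1 hj2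
    have := congrArg (fun x => (l - x) % l) heq
    simp only at this
    rw [shift_invol l j1 hj1.1, shift_invol l j2 hj2.1] at this
    exact this
  · intro b hb
    rw [Finset.mem_filter, Finset.mem_range] at hb
    refine ⟨(l - b) % l, ?_, shift_invol l b hb.1⟩
    rw [Finset.mem_filter, Finset.mem_range]
    exact ⟨Nat.mod_lt _ hl, by rw [shift_invol l b hb.1]; exact hb.2⟩


-- Prop-conditioned counting fold (the port's if-condition is a Prop, not a Bool)
theorem foldl_count_if_prop {α : Type} (Q : α → Prop) [DecidablePred Q] (l : List α) (a : Int) :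
    l.foldl (fun acc x => if Q x then acc + 1 else acc) a
      = a + (l.countP (fun x => decide (Q x)) : Int) := by
  induction l generalizing a with
  | nil => simp
  | cons x xs ih =>
    rw [List.foldl_cons, ih, List.countP_cons]
    by_cases hx : Q x
    · simp [hx]; omega
    · simp [hx]

theorem occ_eq_count (P A : String) (hn : P.toList ≠ []) (hl : A.toList ≠ []) :
    occ P A = (((Finset.range A.toList.length).filter
      (fun j => cyclicMatch P.toList A.toList
        ((A.toList.length - j) % A.toList.length) = true)).card : Int) := by
  have hl' : 0 < A.toList.length := List.length_pos_iff.mpr hl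
  unfold occ circularShifts
  rw [List.foldl_map, foldl_count_if_prop]
  rw [PySem.List.pyRange_zero_nat, List.countP_map]
  rw [← PySem.List.pyRange_zero_nat, zero_add]
  congr 1
  rw [show ((fun x => decide
        (PySem.List.slice
          ((PySem.List.pyRange 0 ((A.toList.length : Nat) : Int) 1).map
              (fun i => PySem.List.pyGetD A.toList (i - x) ' ') ++
            PySem.List.pyRepeat
              ((PySem.List.pyRange 0 ((A.toList.length : Nat) : Int) 1).map
                (fun i => PySem.List.pyGetD A.toList (i - x) ' '))
              (PySem.Int.floordiv ((P.toList.length : Nat) : Int) ((A.toList.length : Nat) : Int)))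
          none (some ((P.toList.length : Nat) : Int)) = P.toList)) ∘ (fun k : Nat => (k : Int)))
      = (fun j : Nat => decide
        (PySem.List.slice
          ((PySem.List.pyRange 0 ((A.toList.length : Nat) : Int) 1).map
              (fun i => PySem.List.pyGetD A.toList (i - (j : Int)) ' ') ++
            PySem.List.pyRepeat
              ((PySem.List.pyRange 0 ((A.toList.length : Nat) : Int) 1).map
                (fun i => PySem.List.pyGetD A.toList (i - (j : Int)) ' '))
              (PySem.Int.floordiv ((P.toList.length : Nat) : Int) ((A.toList.length : Nat) : Int)))
          none (some ((P.toList.length : Nat) : Int)) = P.toList)) from rfl]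
  rw [← cardFilterRange]
  congr 1
  apply Finset.filter_congr
  intro j hj
  rw [Finset.mem_range] at hj
  rw [condA_iff P.toList A.toList j hj hn]

-- ===== VERDICT (by name: the statement is the Claim_ definition above) =====
theorem occ_spec : Claim_equal_occ := by
  unfold Claim_equal_occ
  intro P A _
  unfold Spec_occ
  by_cases hA : A.toList = []
  · simp [occ, occ_alt, circularShifts, hA]
  · have hl' : 0 < A.toList.length := List.length_pos_iff.mpr hA
    by_cases hP : P.toList = []
    · -- n = 0: every shift counts; both sides are l
      unfold occ occ_alt circularShifts
      rw [List.foldl_map, foldl_count_if_prop]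
      rw [List.countP_eq_length.mpr ?_]
      · simp [hP, PySem.List.length_pyRange_one]
      · intro x hx
        simp only [hP, List.length_nil, Nat.cast_zero, decide_eq_true_eq]
        rw [PySem.List.slice_to _ (le_refl 0)]
        rfl
    · -- main case
      rw [occ_eq_count P A hP hA,
        card_shift_bij A.toList.length (fun q => cyclicMatch P.toList A.toList q = true)]
      unfold occ_alt
      rw [if_neg (by simpa using hA), if_neg (by simpa using hP)]
      rw [occFindLoop_eq _ _ hP 0 0, zero_add]
      obtain ⟨hTlen, _⟩ := cyclicText_spec P.toList A.toList hA hP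
      have hn' : 0 < P.toList.length := List.length_pos_iff.mpr hP
      congr 1
      unfold matchCnt
      rw [hTlen]
      have hset : (Finset.range (A.toList.length + P.toList.length - 1)).filter
            (fun j => 0 ≤ j ∧ P.toList <+: (PySem.List.slice
              (PySem.List.pyRepeat A.toList
                (-PySem.Int.floordiv (-((A.toList.length : Int) + (P.toList.length : Int) - 1))
                  (A.toList.length : Int)))
              none (some ((A.toList.length : Int) + (P.toList.length : Int) - 1))).drop j)
          = (Finset.range A.toList.length).filter
              (fun q => cyclicMatch P.toList A.toList q = true) := by
        ext j
        simp only [Finset.mem_filter, Finset.mem_range, Nat.zero_le, true_and]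
        constructor
        · rintro ⟨hjL, hpref⟩
          by_cases hjl : j < A.toList.length
          · exact ⟨hjl, (prefix_iff_cyclicMatch _ _ hA hP j hjl).mp hpref⟩
          · exact absurd hpref (noMatchBeyond _ _ hA hP j (by omega))
        · rintro ⟨hjl, hmatch⟩
          exact ⟨by omega, (prefix_iff_cyclicMatch _ _ hA hP j hjl).mpr hmatch⟩
      rw [hset]
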